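-- pv_equiv track=rewrite | github.com/nikithap1224/locustMRAWS_upload | swarm_logic01/logic02.py | find_clear_cell_outside_path
-- ===== SOURCE A (Python) =====
-- SNAP        = 5     # pixel tolerance
--
-- def _close(a, b):       return abs(a - b) < SNAP
--
-- def find_clear_cell_outside_path(pos, obstacle_positions, path_corridor, grid, bot_facing=None):
--     """
--     Find a clear cell for an idle bot to move to that is:
--     1. Not occupied by any obstacle
--     2. COMPLETELY OUTSIDE the block's planned path corridor
--
--     Searches outward in rings (Manhattan distance 1, 2, 3...) until
--     a valid cell is found.
--
--     Args:
--         bot_facing: (dx, dy) tuple like (1,0) for right, (0,-1) for up, etc.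
--                     If provided, prefers cells the bot can reach WITHOUT turning.
--
--     Returns: (x, y) or None if no cell found within search radius
--     """
--     x, y = pos
--
--     # Search outward in rings up to 10 grid cells away
--     for radius in range(1, 11):
--         candidates = []
--         for dx_cells in range(-radius, radius + 1):
--             for dy_cells in range(-radius, radius + 1):
--                 if abs(dx_cells) + abs(dy_cells) != radius:
--                     continue  # Only check cells at exactly this Manhattan distance
--                 cx = x + dx_cells * grid
--                 cy = y + dy_cells * grid
--
--                 # Bounds check
--                 if cx < 0 or cy < 0:
--                     continue
--
--                 candidate = (cx, cy)
--
--                 # Must not be occupied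
--                 if candidate in obstacle_positions:
--                     continue
--
--                 # Must NOT be in the path corridor
--                 if candidate in path_corridor:
--                     continue
--
--                 candidates.append(candidate)
--
--         if candidates:
--             def sort_key(c):
--                 dx_dir = 1 if c[0] > x else (-1 if c[0] < x else 0)
--                 dy_dir = 1 if c[1] > y else (-1 if c[1] < y else 0)
--
--                 # If we know the bot's facing direction, prefer moves
--                 # that match it (0 turns needed)
--                 if bot_facing:
--                     fx, fy = bot_facing
--                     # Exact same direction as facing → 0 turns
--                     if (dx_dir, dy_dir) == (fx, fy):
--                         return 0
--                     # Axis-aligned but different direction (perpendicular) → 1 turn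
--                     on_same_x = _close(c[0], x)
--                     on_same_y = _close(c[1], y)
--                     if on_same_x or on_same_y:
--                         return 1
--                     # Diagonal / opposite → 2 turns
--                     return 2
--                 else:
--                     # No facing info — just prefer axis-aligned
--                     on_same_x = _close(c[0], x)
--                     on_same_y = _close(c[1], y)
--                     if on_same_x or on_same_y:
--                         return 0
--                     return 1
--
--             candidates.sort(key=sort_key)
--             return candidates[0]
--
--     return None  # Nothing found within 10-cell radius
-- ===== SOURCE B (Python) =====
-- SNAP = 5  # pixel tolerance
--
--
-- def find_clear_cell_outside_path(pos, obstacle_positions, path_corridor, grid, bot_facing=None):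
--     """Instead of A's staged ring-by-ring search (build a list per radius, sort
--     it, return its head), do ONE flat pass over the whole 21x21 offset square:
--     collect every valid candidate tagged with its Manhattan radius and turn-cost
--     key, and take the global argmin of the composite key (radius, turn_cost)
--     with min(), whose first-seen tie-break in dx-outer/dy-inner order matches
--     A's stable per-ring sort."""
--     x, y = pos
--
--     def turn_key(c):
--         dx_dir = 1 if c[0] > x else (-1 if c[0] < x else 0)
--         dy_dir = 1 if c[1] > y else (-1 if c[1] < y else 0)
--         axis = abs(c[0] - x) < SNAP or abs(c[1] - y) < SNAP
--         if bot_facing: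
--             fx, fy = bot_facing
--             if (dx_dir, dy_dir) == (fx, fy):
--                 return 0
--             return 1 if axis else 2
--         return 0 if axis else 1
--
--     cands = [
--         (abs(dx) + abs(dy), turn_key((x + dx * grid, y + dy * grid)), (x + dx * grid, y + dy * grid))
--         for dx in range(-10, 11)
--         for dy in range(-10, 11)
--         if 1 <= abs(dx) + abs(dy) <= 10
--         and x + dx * grid >= 0 and y + dy * grid >= 0
--         and (x + dx * grid, y + dy * grid) not in obstacle_positions
--         and (x + dx * grid, y + dy * grid) not in path_corridor
--     ]
--     if not cands:
--         return None
--     return min(cands, key=lambda t: (t[0], t[1]))[2]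
-- ===== Notes on version B (the rewrite author's own statement) =====
-- stated objective: alternative
-- what changed: Replaces A's staged ring-by-ring search (build a candidate list per radius, stable-sort it by turn cost, return its head, else try the next radius) by a single flat pass over the whole 21x21 offset square that collects every valid candidate tagged with its Manhattan radius and takes one global min() under the composite key (radius, turn cost).
import Mathlib
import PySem

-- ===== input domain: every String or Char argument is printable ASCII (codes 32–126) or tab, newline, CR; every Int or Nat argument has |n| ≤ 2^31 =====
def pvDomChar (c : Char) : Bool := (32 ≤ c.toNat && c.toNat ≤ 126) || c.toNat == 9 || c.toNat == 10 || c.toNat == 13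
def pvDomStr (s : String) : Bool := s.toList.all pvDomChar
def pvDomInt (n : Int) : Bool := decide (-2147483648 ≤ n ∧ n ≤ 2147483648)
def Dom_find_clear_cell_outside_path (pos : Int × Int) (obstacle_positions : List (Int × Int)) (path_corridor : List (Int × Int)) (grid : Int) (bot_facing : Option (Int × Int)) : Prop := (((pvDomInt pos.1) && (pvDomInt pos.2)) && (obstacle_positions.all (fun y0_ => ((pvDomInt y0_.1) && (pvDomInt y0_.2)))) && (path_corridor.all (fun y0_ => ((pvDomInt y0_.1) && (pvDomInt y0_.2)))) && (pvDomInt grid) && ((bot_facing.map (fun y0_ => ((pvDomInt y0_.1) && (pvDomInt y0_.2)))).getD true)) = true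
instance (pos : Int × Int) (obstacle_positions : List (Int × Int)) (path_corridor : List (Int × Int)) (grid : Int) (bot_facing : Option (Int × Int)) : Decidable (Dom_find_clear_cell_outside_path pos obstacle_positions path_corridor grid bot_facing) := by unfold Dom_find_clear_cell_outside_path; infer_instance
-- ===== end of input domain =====

-- B replaces A's staged ring-by-ring search (candidate list per radius + stable sort + head)
-- by ONE flat pass over the whole offset square taking the argmin of the composite
-- key (Manhattan radius, turn cost) with a first-seen tie-break (objective: alternative).

-- shared helper: the turn-cost key (A's local sort_key; B's local turn_key)
def pvTurnKey (x y : Int) (bot_facing : Option (Int × Int)) (c : Int × Int) : Int :=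
  let dx_dir : Int := if c.1 > x then 1 else if c.1 < x then -1 else 0
  let dy_dir : Int := if c.2 > y then 1 else if c.2 < y then -1 else 0
  match bot_facing with
  | some (fx, fy) =>
      if dx_dir = fx ∧ dy_dir = fy then 0
      else if |c.1 - x| < 5 ∨ |c.2 - y| < 5 then 1
      else 2
  | none => if |c.1 - x| < 5 ∨ |c.2 - y| < 5 then 0 else 1

-- ===== PORT A =====
-- the candidate list of one ring, in A's dx-outer / dy-inner order
def pvRingA (x y : Int) (obstacle_positions path_corridor : List (Int × Int)) (grid r : Int) : List (Int × Int) :=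
  (PySem.List.pyRange (-r) (r+1)).foldl (fun acc dx =>
    (PySem.List.pyRange (-r) (r+1)).foldl (fun acc dy =>
      if |dx| + |dy| ≠ r then acc
      else
        let cx := x + dx * grid
        let cy := y + dy * grid
        if cx < 0 ∨ cy < 0 then acc
        else if (cx, cy) ∈ obstacle_positions then acc
        else if (cx, cy) ∈ path_corridor then acc
        else acc ++ [(cx, cy)]) acc) []

-- the radius loop with early return: sort the ring's candidates (stable) and take [0]
def pvSearchA (x y : Int) (obstacle_positions path_corridor : List (Int × Int)) (grid : Int) (bot_facing : Option (Int × Int)) : List Int → Option (Int × Int)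
  | [] => none
  | r :: rs =>
      let candidates := pvRingA x y obstacle_positions path_corridor grid r
      if candidates.isEmpty then pvSearchA x y obstacle_positions path_corridor grid bot_facing rs
      else (PySem.List.sorted candidates (pvTurnKey x y bot_facing)).head?

def find_clear_cell_outside_path (pos : Int × Int) (obstacle_positions : List (Int × Int)) (path_corridor : List (Int × Int)) (grid : Int) (bot_facing : Option (Int × Int)) : Option (Int × Int) :=
  pvSearchA pos.1 pos.2 obstacle_positions path_corridor grid bot_facing (PySem.List.pyRange 1 11)

-- ===== PORT B =====
-- Source B's comprehension: every valid candidate in the 21×21 square, tagged (radius, turn_key, cell)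
def pvCandsB (x y : Int) (obstacle_positions path_corridor : List (Int × Int)) (grid : Int) (bot_facing : Option (Int × Int)) : List (Int × Int × (Int × Int)) :=
  (PySem.List.pyRange (-10) 11).foldl (fun acc dx =>
    (PySem.List.pyRange (-10) 11).foldl (fun acc dy =>
      if 1 ≤ |dx| + |dy| ∧ |dx| + |dy| ≤ 10 ∧
         0 ≤ x + dx * grid ∧ 0 ≤ y + dy * grid ∧
         (x + dx * grid, y + dy * grid) ∉ obstacle_positions ∧
         (x + dx * grid, y + dy * grid) ∉ path_corridor
      then acc ++ [(|dx| + |dy|, pvTurnKey x y bot_facing (x + dx * grid, y + dy * grid), (x + dx * grid, y + dy * grid))]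
      else acc) acc) []

-- 'if not cands: return None; return min(cands, key=lambda t: (t[0], t[1]))[2]'
def find_clear_cell_outside_path_alt (pos : Int × Int) (obstacle_positions : List (Int × Int)) (path_corridor : List (Int × Int)) (grid : Int) (bot_facing : Option (Int × Int)) : Option (Int × Int) :=
  let cands := pvCandsB pos.1 pos.2 obstacle_positions path_corridor grid bot_facing
  if cands.isEmpty then none
  else (PySem.List.min2? cands (fun t => t.1) (fun t => t.2.1)).map (fun t => t.2.2)

-- ===== PRECONDITION & SPEC =====
def Spec_find_clear_cell_outside_path (pos : Int × Int) (obstacle_positions : List (Int × Int)) (path_corridor : List (Int × Int)) (grid : Int) (bot_facing : Option (Int × Int)) (out : Option (Int × Int)) : Prop := out = find_clear_cell_outside_path_alt pos obstacle_positions path_corridor grid bot_facing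
instance (pos : Int × Int) (obstacle_positions : List (Int × Int)) (path_corridor : List (Int × Int)) (grid : Int) (bot_facing : Option (Int × Int)) (out : Option (Int × Int)) : Decidable (Spec_find_clear_cell_outside_path pos obstacle_positions path_corridor grid bot_facing out) := by unfold Spec_find_clear_cell_outside_path; infer_instance

-- ===== CLAIM (what is proved, stated in full; the proofs are below) =====
def Claim_equal_find_clear_cell_outside_path : Prop := ∀ (pos : Int × Int) (obstacle_positions : List (Int × Int)) (path_corridor : List (Int × Int)) (grid : Int) (bot_facing : Option (Int × Int)), Dom_find_clear_cell_outside_path pos obstacle_positions path_corridor grid bot_facing → Spec_find_clear_cell_outside_path pos obstacle_positions path_corridor grid bot_facing (find_clear_cell_outside_path pos obstacle_positions path_corridor grid bot_facing)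

-- ===== LEMMAS AND PROOFS =====

-- the first-seen strict-minimum step (shape shared by A's sorted-head and B's min2?)
def pvStep {α K : Type} [LinearOrder K] (κ : α → K) (b : Option α) (c : α) : Option α :=
  match b with
  | none => some c
  | some m => if κ c < κ m then some c else some m

-- 'is a global minimum of L under κ', as a Bool predicate
def pvMinPred {α K : Type} [LinearOrder K] (κ : α → K) (L : List α) (c : α) : Bool :=
  L.all (fun c' => decide (κ c ≤ κ c'))

-- B's per-offset emitted candidate list (proof-side view of the comprehension body)
def pvEmitB (x y : Int) (obstacle_positions path_corridor : List (Int × Int)) (grid : Int) (bot_facing : Option (Int × Int)) (dx dy : Int) : List (Int × Int × (Int × Int)) :=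
  if 1 ≤ |dx| + |dy| ∧ |dx| + |dy| ≤ 10 ∧
     0 ≤ x + dx * grid ∧ 0 ≤ y + dy * grid ∧
     (x + dx * grid, y + dy * grid) ∉ obstacle_positions ∧
     (x + dx * grid, y + dy * grid) ∉ path_corridor
  then [(|dx| + |dy|, pvTurnKey x y bot_facing (x + dx * grid, y + dy * grid), (x + dx * grid, y + dy * grid))]
  else []

-- A's per-offset emitted cell list (proof-side view of the ring body)
def pvEmitA (x y : Int) (obstacle_positions path_corridor : List (Int × Int)) (grid r : Int) (dx dy : Int) : List (Int × Int) :=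
  if |dx| + |dy| ≠ r then []
  else if x + dx * grid < 0 ∨ y + dy * grid < 0 then []
  else if (x + dx * grid, y + dy * grid) ∈ obstacle_positions then []
  else if (x + dx * grid, y + dy * grid) ∈ path_corridor then []
  else [(x + dx * grid, y + dy * grid)]

-- the tagging map from A's cells to B's tuples
def pvTup (x y : Int) (bot_facing : Option (Int × Int)) (r : Int) (c : Int × Int) : Int × Int × (Int × Int) :=
  (r, pvTurnKey x y bot_facing c, c)

-- the lexicographic composite key B minimizes
def pvKeyLex (t : Int × Int × (Int × Int)) : Int ×ₗ Int := toLex (t.1, t.2.1)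

theorem pv_foldl_step_of_min {α K : Type} [LinearOrder K] (κ : α → K) :
    ∀ (L : List α) (b : α), (∀ x ∈ L, ¬ κ x < κ b) → L.foldl (pvStep κ) (some b) = some b := by
  intro L
  induction L with
  | nil => intro b _; rfl
  | cons a L ih =>
      intro b h
      simp only [List.foldl_cons, pvStep]
      rw [if_neg (h a (by simp))]
      exact ih b (fun x hx => h x (by simp [hx]))

theorem pv_foldl_step_of_beaten {α K : Type} [LinearOrder K] (κ : α → K) :
    ∀ (L : List α) (b c0 : α), c0 ∈ L → κ c0 < κ b →
      L.foldl (pvStep κ) (some b) = L.foldl (pvStep κ) none := by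
  intro L
  induction L with
  | nil => intro b c0 h; simp at h
  | cons a L ih =>
      intro b c0 hmem hlt
      simp only [List.foldl_cons]
      by_cases ha : κ a < κ b
      · simp [pvStep, ha]
      · have hne : c0 ≠ a := by rintro rfl; exact ha hlt
        have hc0 : c0 ∈ L := by
          rcases List.mem_cons.mp hmem with h | h
          · exact absurd h hne
          · exact h
        have hlt' : κ c0 < κ a := lt_of_lt_of_le hlt (not_lt.mp ha)
        show L.foldl (pvStep κ) (pvStep κ (some b) a) = L.foldl (pvStep κ) (pvStep κ none a)
        simp only [pvStep, if_neg ha]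
        rw [ih b c0 hc0 hlt, ← ih a c0 hc0 hlt']

theorem pv_find?_congr_mem {α : Type} (p q : α → Bool) :
    ∀ (L : List α), (∀ x ∈ L, p x = q x) → L.find? p = L.find? q := by
  intro L
  induction L with
  | nil => intro _; rfl
  | cons a L ih =>
      intro h
      simp only [List.find?_cons, h a (by simp)]
      cases hq : q a
      · simp only [cond_false]; exact ih (fun x hx => h x (by simp [hx]))
      · rfl

theorem pv_find?_filter {α : Type} (p q : α → Bool) :
    ∀ (L : List α), (∀ x ∈ L, p x = true → q x = true) →
      L.find? p = (L.filter q).find? p := by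
  intro L
  induction L with
  | nil => intro _; rfl
  | cons a L ih =>
      intro h
      by_cases hp : p a = true
      · have hq := h a (by simp) hp
        simp [List.find?_cons, List.filter_cons, hp, hq]
      · have hp' : p a = false := by simpa using hp
        have ih' := ih (fun x hx => h x (by simp [hx]))
        cases hq : q a
        · simp [List.filter_cons, hq, List.find?_cons, hp', ih']
        · simp [List.filter_cons, hq, List.find?_cons, hp', ih']

theorem pv_foldl_step_eq_find {α K : Type} [LinearOrder K] (κ : α → K) :
    ∀ (L : List α), L.foldl (pvStep κ) none = L.find? (pvMinPred κ L) := by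
  intro L
  induction L with
  | nil => rfl
  | cons a L ih =>
      simp only [List.foldl_cons]
      show L.foldl (pvStep κ) (some a) = _
      by_cases hmin : ∀ x ∈ L, κ a ≤ κ x
      · rw [pv_foldl_step_of_min κ L a (fun x hx => not_lt.mpr (hmin x hx))]
        have : pvMinPred κ (a :: L) a = true := by
          simp [pvMinPred]
          exact fun x hx => hmin x hx
        simp [List.find?_cons, this]
      · push_neg at hmin
        obtain ⟨c0, hc0, hlt⟩ := hmin
        have hlt : κ c0 < κ a := hlt
        rw [pv_foldl_step_of_beaten κ L a c0 hc0 hlt, ih]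
        have hpa : pvMinPred κ (a :: L) a = false := by
          simp [pvMinPred]
          exact ⟨c0, hc0, hlt⟩
        simp only [List.find?_cons, hpa, cond_false]
        apply pv_find?_congr_mem
        intro x hx
        rw [Bool.eq_iff_iff]
        simp only [pvMinPred, List.all_cons, List.all_eq_true, Bool.and_eq_true, decide_eq_true_iff]
        constructor
        · intro h
          exact ⟨le_of_lt (lt_of_le_of_lt (h c0 hc0) hlt), h⟩
        · rintro ⟨_, h⟩ z hz
          exact h z hz

theorem pvRingA_eq_flatMap (x y : Int) (o c : List (Int × Int)) (g r : Int) :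
    pvRingA x y o c g r
      = (PySem.List.pyRange (-r) (r+1)).flatMap (fun dx =>
          (PySem.List.pyRange (-r) (r+1)).flatMap (fun dy => pvEmitA x y o c g r dx dy)) := by
  unfold pvRingA
  have hinner : ∀ (acc : List (Int × Int)) (dx : Int),
      (PySem.List.pyRange (-r) (r+1)).foldl (fun acc dy =>
        if |dx| + |dy| ≠ r then acc
        else
          let cx := x + dx * g
          let cy := y + dy * g
          if cx < 0 ∨ cy < 0 then acc
          else if (cx, cy) ∈ o then acc
          else if (cx, cy) ∈ c then acc
          else acc ++ [(cx, cy)]) acc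
      = acc ++ (PySem.List.pyRange (-r) (r+1)).flatMap (fun dy => pvEmitA x y o c g r dx dy) := by
    intro acc dx
    rw [← PySem.List.foldl_append_eq_flatMap]
    apply PySem.List.foldl_congr_mem
    intro acc' dy hdy
    simp only [pvEmitA]
    split_ifs <;> simp
  calc (PySem.List.pyRange (-r) (r+1)).foldl _ []
      = (PySem.List.pyRange (-r) (r+1)).foldl (fun acc dx =>
          acc ++ (PySem.List.pyRange (-r) (r+1)).flatMap (fun dy => pvEmitA x y o c g r dx dy)) [] := by
        apply PySem.List.foldl_congr_mem
        intro acc dx _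
        exact hinner acc dx
    _ = _ := by rw [PySem.List.foldl_append_eq_flatMap]; simp

theorem pvCandsB_eq_flatMap (x y : Int) (o c : List (Int × Int)) (g : Int) (bf : Option (Int × Int)) :
    pvCandsB x y o c g bf
      = (PySem.List.pyRange (-10) 11).flatMap (fun dx =>
          (PySem.List.pyRange (-10) 11).flatMap (fun dy => pvEmitB x y o c g bf dx dy)) := by
  unfold pvCandsB
  have hinner : ∀ (acc : List (Int × Int × (Int × Int))) (dx : Int),
      (PySem.List.pyRange (-10) 11).foldl (fun acc dy =>
        if 1 ≤ |dx| + |dy| ∧ |dx| + |dy| ≤ 10 ∧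
           0 ≤ x + dx * g ∧ 0 ≤ y + dy * g ∧
           (x + dx * g, y + dy * g) ∉ o ∧
           (x + dx * g, y + dy * g) ∉ c
        then acc ++ [(|dx| + |dy|, pvTurnKey x y bf (x + dx * g, y + dy * g), (x + dx * g, y + dy * g))]
        else acc) acc
      = acc ++ (PySem.List.pyRange (-10) 11).flatMap (fun dy => pvEmitB x y o c g bf dx dy) := by
    intro acc dx
    rw [← PySem.List.foldl_append_eq_flatMap]
    apply PySem.List.foldl_congr_mem
    intro acc' dy hdy
    simp only [pvEmitB]
    split_ifs <;> simp
  calc (PySem.List.pyRange (-10) 11).foldl _ []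
      = (PySem.List.pyRange (-10) 11).foldl (fun acc dx =>
          acc ++ (PySem.List.pyRange (-10) 11).flatMap (fun dy => pvEmitB x y o c g bf dx dy)) [] := by
        apply PySem.List.foldl_congr_mem
        intro acc dx _
        exact hinner acc dx
    _ = _ := by rw [PySem.List.foldl_append_eq_flatMap]; simp

theorem pv_flatMap_restrict {β : Type} (g : Int → List β) (a b a' b' : Int)
    (ha : a ≤ a') (hm : a' ≤ b') (hb : b' ≤ b)
    (h : ∀ z, g z ≠ [] → a' ≤ z ∧ z < b') :
    (PySem.List.pyRange a b).flatMap g = (PySem.List.pyRange a' b').flatMap g := by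
  rw [PySem.List.pyRange_one_append a a' b ha (le_trans hm hb),
      PySem.List.pyRange_one_append a' b' b hm hb]
  have h1 : (PySem.List.pyRange a a').flatMap g = [] := by
    rw [List.flatMap_eq_nil_iff]
    intro z hz
    rw [PySem.List.mem_pyRange_one] at hz
    by_contra hne
    have := h z hne
    omega
  have h2 : (PySem.List.pyRange b' b).flatMap g = [] := by
    rw [List.flatMap_eq_nil_iff]
    intro z hz
    rw [PySem.List.mem_pyRange_one] at hz
    by_contra hne
    have := h z hne
    omega
  simp [List.flatMap_append, h1, h2]

theorem pv_min2_eq_foldl (L : List (Int × Int × (Int × Int))) :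
    PySem.List.min2? L (fun t => t.1) (fun t => t.2.1) = L.foldl (pvStep pvKeyLex) none := by
  unfold PySem.List.min2?
  apply PySem.List.foldl_congr_mem
  intro acc t _
  cases acc with
  | none => rfl
  | some m =>
      show (if _ = true then some t else some m) = (if pvKeyLex t < pvKeyLex m then some t else some m)
      congr 1
      simp only [pvKeyLex, Prod.Lex.lt_iff]
      by_cases h1 : t.1 < m.1 <;> by_cases h2 : t.2.1 < m.2.1 <;>
        simp [h1, h2] <;> omega

-- head of an insertion = strict-min step on heads
theorem pv_head_insertBy (key : (Int × Int) → Int) (x : Int × Int) (acc : List (Int × Int)) :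
    (PySem.List.insertBy (fun a b => decide (key a < key b)) x acc).head? = pvStep key acc.head? x := by
  cases acc with
  | nil => simp [PySem.List.insertBy, pvStep]
  | cons m t =>
      simp only [PySem.List.insertBy, pvStep]
      split <;> simp_all

theorem pv_head_foldl_insertBy (key : (Int × Int) → Int) :
    ∀ (l : List (Int × Int)) (acc : List (Int × Int)),
      (l.foldl (fun acc x => PySem.List.insertBy (fun a b => decide (key a < key b)) x acc) acc).head?
        = l.foldl (pvStep key) acc.head? := by
  intro l
  induction l with
  | nil => intro acc; rfl
  | cons x xs ih =>
      intro acc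
      simp only [List.foldl_cons]
      rw [ih, pv_head_insertBy]

-- the head of A's stable sort is the first global key-minimum
theorem pv_head_sorted (key : (Int × Int) → Int) (l : List (Int × Int)) :
    (PySem.List.sorted l key).head? = l.find? (pvMinPred key l) := by
  rw [PySem.List.sorted_eq_foldl_insertBy, ← pv_foldl_step_eq_find]
  simpa using pv_head_foldl_insertBy key l []

theorem pv_mem_emitB (x y : Int) (o c : List (Int × Int)) (g : Int) (bf : Option (Int × Int))
    (dx dy : Int) (t : Int × Int × (Int × Int)) (ht : t ∈ pvEmitB x y o c g bf dx dy) :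
    1 ≤ t.1 ∧ t.1 ≤ 10 ∧ ∃ cell ∈ pvRingA x y o c g t.1, t = pvTup x y bf t.1 cell := by
  simp only [pvEmitB] at ht
  split_ifs at ht with hc
  · simp only [List.mem_singleton] at ht
    obtain ⟨h1, h2, h3, h4, h5, h6⟩ := hc
    subst ht
    refine ⟨h1, h2, (x + dx * g, y + dy * g), ?_, rfl⟩
    rw [pvRingA_eq_flatMap]
    rw [List.mem_flatMap]
    refine ⟨dx, ?_, ?_⟩
    · rw [PySem.List.mem_pyRange_one]
      constructor <;> [skip; skip] <;> cases abs_cases dx <;> cases abs_cases dy <;> omega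
    · rw [List.mem_flatMap]
      refine ⟨dy, ?_, ?_⟩
      · rw [PySem.List.mem_pyRange_one]
        constructor <;> cases abs_cases dx <;> cases abs_cases dy <;> omega
      · simp only [pvEmitA]
        rw [if_neg (by omega), if_neg (by omega), if_neg h5, if_neg h6]
        simp
  · simp at ht

theorem pv_mem_cands (x y : Int) (o c : List (Int × Int)) (g : Int) (bf : Option (Int × Int))
    (t : Int × Int × (Int × Int)) (ht : t ∈ pvCandsB x y o c g bf) :
    1 ≤ t.1 ∧ t.1 ≤ 10 ∧ ∃ cell ∈ pvRingA x y o c g t.1, t = pvTup x y bf t.1 cell := by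
  rw [pvCandsB_eq_flatMap] at ht
  rw [List.mem_flatMap] at ht
  obtain ⟨dx, _, ht⟩ := ht
  rw [List.mem_flatMap] at ht
  obtain ⟨dy, _, ht⟩ := ht
  exact pv_mem_emitB x y o c g bf dx dy t ht

theorem pv_tup_mem_cands (x y : Int) (o c : List (Int × Int)) (g : Int) (bf : Option (Int × Int))
    (r : Int) (h1 : 1 ≤ r) (h10 : r ≤ 10) (cell : Int × Int)
    (hc : cell ∈ pvRingA x y o c g r) :
    pvTup x y bf r cell ∈ pvCandsB x y o c g bf := by
  rw [pvRingA_eq_flatMap] at hc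
  rw [List.mem_flatMap] at hc
  obtain ⟨dx, hdx, hc⟩ := hc
  rw [List.mem_flatMap] at hc
  obtain ⟨dy, hdy, hc⟩ := hc
  rw [PySem.List.mem_pyRange_one] at hdx hdy
  simp only [pvEmitA] at hc
  split_ifs at hc with g1 g2 g3 g4
  · simp at hc
  · simp at hc
  · simp at hc
  · simp at hc
  · simp only [List.mem_singleton] at hc
    subst hc
    rw [pvCandsB_eq_flatMap, List.mem_flatMap]
    refine ⟨dx, ?_, ?_⟩
    · rw [PySem.List.mem_pyRange_one]; omega
    · rw [List.mem_flatMap]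
      refine ⟨dy, ?_, ?_⟩
      · rw [PySem.List.mem_pyRange_one]; omega
      · simp only [pvEmitB]
        rw [if_pos ⟨by omega, by omega, by omega, by omega, g3, g4⟩]
        simp [pvTup]
        omega

theorem pv_emit_filter (x y : Int) (o c : List (Int × Int)) (g : Int) (bf : Option (Int × Int))
    (r : Int) (h1 : 1 ≤ r) (h10 : r ≤ 10) (dx dy : Int) :
    (pvEmitB x y o c g bf dx dy).filter (fun t => decide (t.1 = r))
      = (pvEmitA x y o c g r dx dy).map (pvTup x y bf r) := by
  simp only [pvEmitB, pvEmitA]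
  by_cases hC : 1 ≤ |dx| + |dy| ∧ |dx| + |dy| ≤ 10 ∧
      0 ≤ x + dx * g ∧ 0 ≤ y + dy * g ∧
      (x + dx * g, y + dy * g) ∉ o ∧
      (x + dx * g, y + dy * g) ∉ c
  · obtain ⟨c1, c2, c3, c4, c5, c6⟩ := hC
    rw [if_pos ⟨c1, c2, c3, c4, c5, c6⟩]
    by_cases hr : |dx| + |dy| = r
    · rw [if_neg (by omega), if_neg (by omega), if_neg c5, if_neg c6]
      simp [List.filter, hr, pvTup]
    · rw [if_pos (by omega)]
      simp [List.filter, hr]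
  · rw [if_neg hC]
    by_cases hr : |dx| + |dy| = r
    · subst hr
      by_cases b1 : x + dx * g < 0 ∨ y + dy * g < 0
      · rw [if_neg (by omega), if_pos b1]; rfl
      · by_cases b2 : (x + dx * g, y + dy * g) ∈ o
        · rw [if_neg (by omega), if_neg b1, if_pos b2]; rfl
        · by_cases b3 : (x + dx * g, y + dy * g) ∈ c
          · rw [if_neg (by omega), if_neg b1, if_neg b2, if_pos b3]; rfl
          · exact absurd ⟨h1, h10, by omega, by omega, b2, b3⟩ hC
    · rw [if_pos (by omega)]; rfl

theorem pv_emitA_ne_nil (x y : Int) (o c : List (Int × Int)) (g r : Int) (dx dy : Int)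
    (h : pvEmitA x y o c g r dx dy ≠ []) : |dx| + |dy| = r := by
  by_contra hne
  exact h (by simp only [pvEmitA]; rw [if_pos hne])

theorem pv_filter_cands (x y : Int) (o c : List (Int × Int)) (g : Int) (bf : Option (Int × Int))
    (r : Int) (h1 : 1 ≤ r) (h10 : r ≤ 10) :
    (pvCandsB x y o c g bf).filter (fun t => decide (t.1 = r))
      = (pvRingA x y o c g r).map (pvTup x y bf r) := by
  rw [pvCandsB_eq_flatMap, pvRingA_eq_flatMap]
  simp only [List.filter_flatMap]
  have hpt : ∀ dx dy : Int,
      (pvEmitB x y o c g bf dx dy).filter (fun t => decide (t.1 = r))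
        = (pvEmitA x y o c g r dx dy).map (pvTup x y bf r) :=
    pv_emit_filter x y o c g bf r h1 h10
  have hin : ∀ dx : Int,
      (PySem.List.pyRange (-10) 11).flatMap
          (fun dy => (pvEmitA x y o c g r dx dy).map (pvTup x y bf r))
        = (PySem.List.pyRange (-r) (r+1)).flatMap
          (fun dy => (pvEmitA x y o c g r dx dy).map (pvTup x y bf r)) := by
    intro dx
    apply pv_flatMap_restrict _ _ _ _ _ (by omega) (by omega) (by omega)
    intro dy hne
    have he : pvEmitA x y o c g r dx dy ≠ [] := by
      intro h0; rw [h0] at hne; exact hne rfl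
    have := pv_emitA_ne_nil x y o c g r dx dy he
    cases abs_cases dx <;> cases abs_cases dy <;> omega
  calc (PySem.List.pyRange (-10) 11).flatMap
        (fun dx => (PySem.List.pyRange (-10) 11).flatMap
          (fun dy => (pvEmitB x y o c g bf dx dy).filter (fun t => decide (t.1 = r))))
      = (PySem.List.pyRange (-10) 11).flatMap
        (fun dx => (PySem.List.pyRange (-r) (r+1)).flatMap
          (fun dy => (pvEmitA x y o c g r dx dy).map (pvTup x y bf r))) := by
        simp only [hpt, hin]
    _ = (PySem.List.pyRange (-r) (r+1)).flatMap
        (fun dx => (PySem.List.pyRange (-r) (r+1)).flatMap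
          (fun dy => (pvEmitA x y o c g r dx dy).map (pvTup x y bf r))) := by
        apply pv_flatMap_restrict _ _ _ _ _ (by omega) (by omega) (by omega)
        intro dx hne
        have hex : ¬ ∀ dy ∈ PySem.List.pyRange (-r) (r+1),
            (pvEmitA x y o c g r dx dy).map (pvTup x y bf r) = [] := by
          intro hall
          exact hne (List.flatMap_eq_nil_iff.mpr hall)
        push_neg at hex
        obtain ⟨dy, _, hdy⟩ := hex
        have he : pvEmitA x y o c g r dx dy ≠ [] := by
          intro h0; rw [h0] at hdy; exact hdy rfl
        have := pv_emitA_ne_nil x y o c g r dx dy he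
        cases abs_cases dx <;> cases abs_cases dy <;> omega
    _ = _ := by
        rw [List.map_flatMap]
        congr 1
        funext dx
        rw [List.map_flatMap]

theorem pv_master (x y : Int) (o c : List (Int × Int)) (g : Int) (bf : Option (Int × Int)) :
    ∀ (n : Nat) (j : Int), j = 11 - (n : Int) → 1 ≤ j →
      (∀ r, 1 ≤ r → r < j → pvRingA x y o c g r = []) →
      pvSearchA x y o c g bf (PySem.List.pyRange j 11)
        = (if (pvCandsB x y o c g bf).isEmpty then none
           else (PySem.List.min2? (pvCandsB x y o c g bf) (fun t => t.1) (fun t => t.2.1)).map (fun t => t.2.2)) := by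
  intro n
  induction n with
  | zero =>
      intro j hj _ hEmpty
      have hj11 : j = 11 := by push_cast at hj; omega
      subst hj11
      rw [PySem.List.pyRange_one_eq_nil (by omega)]
      have hnil : pvCandsB x y o c g bf = [] := by
        rw [List.eq_nil_iff_forall_not_mem]
        intro t ht
        obtain ⟨h1, h10, cell, hcell, _⟩ := pv_mem_cands x y o c g bf t ht
        rw [hEmpty t.1 h1 (by omega)] at hcell
        exact absurd hcell (List.not_mem_nil)
      simp [pvSearchA, hnil]
  | succ n ih =>
      intro j hj hj1 hEmpty
      have hjle : j ≤ 10 := by push_cast at hj; omega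
      rw [PySem.List.pyRange_one_cons (by omega)]
      by_cases hE : pvRingA x y o c g j = []
      · have : pvSearchA x y o c g bf (j :: PySem.List.pyRange (j+1) 11)
            = pvSearchA x y o c g bf (PySem.List.pyRange (j+1) 11) := by
          simp [pvSearchA, hE]
        rw [this]
        apply ih (j+1) (by push_cast at hj ⊢; omega) (by omega)
        intro r hr1 hrj
        by_cases hrj' : r < j
        · exact hEmpty r hr1 hrj'
        · have : r = j := by omega
          subst this; exact hE
      · -- nonempty ring j: both sides are the first key-minimum of ring j
        obtain ⟨cell0, hcell0⟩ := List.exists_mem_of_ne_nil _ hE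
        have hAside : pvSearchA x y o c g bf (j :: PySem.List.pyRange (j+1) 11)
            = (pvRingA x y o c g j).find? (pvMinPred (pvTurnKey x y bf) (pvRingA x y o c g j)) := by
          have hne : (pvRingA x y o c g j).isEmpty = false := by
            simp [List.isEmpty_iff, hE]
          simp only [pvSearchA, hne, Bool.false_eq_true, if_false]
          exact pv_head_sorted _ _
        rw [hAside]
        -- B side
        have hcne : pvCandsB x y o c g bf ≠ [] := by
          intro h0
          have := pv_tup_mem_cands x y o c g bf j hj1 hjle cell0 hcell0
          rw [h0] at this
          exact absurd this (List.not_mem_nil)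
        have hcE : (pvCandsB x y o c g bf).isEmpty = false := by simp [List.isEmpty_iff, hcne]
        rw [hcE]
        simp only [Bool.false_eq_true, if_false]
        rw [pv_min2_eq_foldl, pv_foldl_step_eq_find]
        set L := pvCandsB x y o c g bf with hL
        -- radius of any global minimum is j
        have hradge : ∀ t ∈ L, j ≤ t.1 := by
          intro t ht
          obtain ⟨h1, h10, cell, hcell, _⟩ := pv_mem_cands x y o c g bf t ht
          by_contra hlt
          rw [hEmpty t.1 h1 (by omega)] at hcell
          exact absurd hcell (List.not_mem_nil)
        have hstruct : ∀ t ∈ L, ∃ cell ∈ pvRingA x y o c g t.1, t = pvTup x y bf t.1 cell := by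
          intro t ht
          obtain ⟨_, _, cell, hcell, hteq⟩ := pv_mem_cands x y o c g bf t ht
          exact ⟨cell, hcell, hteq⟩
        have htup0 : pvTup x y bf j cell0 ∈ L := pv_tup_mem_cands x y o c g bf j hj1 hjle cell0 hcell0
        have hRad : ∀ t ∈ L, pvMinPred pvKeyLex L t = true → decide (t.1 = j) = true := by
          intro t ht hmin
          rw [pvMinPred, List.all_eq_true] at hmin
          have hle := hmin _ htup0
          rw [decide_eq_true_iff] at hle
          rw [Prod.Lex.le_iff] at hle
          have hge := hradge t ht
          simp only [pvKeyLex, pvTup] at hle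
          rw [decide_eq_true_iff]
          rcases hle with h | h
          · simp at h; omega
          · exact h.1
        rw [pv_find?_filter _ _ L hRad, pv_filter_cands x y o c g bf j hj1 hjle, List.find?_map]
        rw [Option.map_map]
        have hcomp : (((fun t => t.2.2) ∘ pvTup x y bf j) : (Int × Int) → (Int × Int)) = fun cell => cell := by
          funext cell; rfl
        rw [hcomp, Option.map_id']
        apply pv_find?_congr_mem
        intro cell hcell
        rw [Bool.eq_iff_iff]
        simp only [Function.comp_apply, pvMinPred, List.all_eq_true, decide_eq_true_iff]
        constructor
        · intro hall t' ht'
          obtain ⟨cell', hcell', hteq⟩ := hstruct t' ht'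
          have hge := hradge t' ht'
          have hκ : pvKeyLex t' = toLex (t'.1, pvTurnKey x y bf cell') := by rw [hteq]; rfl
          have hκc : pvKeyLex (pvTup x y bf j cell) = toLex (j, pvTurnKey x y bf cell) := rfl
          rw [hκ, hκc, Prod.Lex.le_iff]
          by_cases hgt : j < t'.1
          · left; simpa using hgt
          · have hjeq : t'.1 = j := by omega
            right
            refine ⟨by simpa using hjeq.symm, ?_⟩
            rw [hjeq] at hcell'
            simpa using hall cell' hcell'
        · intro hall c' hc'
          have h0 := hall (pvTup x y bf j c') (pv_tup_mem_cands x y o c g bf j hj1 hjle c' hc')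
          have h1 : (toLex ((j : Int), pvTurnKey x y bf cell) : Int ×ₗ Int) ≤ toLex (j, pvTurnKey x y bf c') := h0
          rw [Prod.Lex.le_iff] at h1
          rcases h1 with h | h
          · simp at h
          · simpa using h.2

-- ===== VERDICT (by name: the statement is the Claim_ definition above) =====
theorem find_clear_cell_outside_path_spec : Claim_equal_find_clear_cell_outside_path := by
  intro pos o c g bf _
  show find_clear_cell_outside_path pos o c g bf = find_clear_cell_outside_path_alt pos o c g bf
  unfold find_clear_cell_outside_path find_clear_cell_outside_path_alt
  exact pv_master pos.1 pos.2 o c g bf 10 1 (by norm_num) le_rfl (by intro r h1 h2; omega)
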